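-- pv_equiv track=rewrite | github.com/resb53/advent | 2025/src/day-02.py | checkComplex
-- ===== SOURCE A (Python) =====
-- def generateDivisors(n):
--     for i in range(1, int(n**0.5) + 1):
--         if n % i == 0:
--             yield i
--             if i != n // i:
--                 yield n // i
--
-- def checkComplex(x):
--     for d in generateDivisors(len(x)):
--         if d != len(x):
--             units = [x[i:i+d] for i in range(0, len(x), d)]
--             # Compare all other units with the first
--             matches = True
--             for chk in units[1:]:
--                 if chk != units[0]:
--                     matches = False
--                     break
--             if matches:
--                 return int(x)
--
--     return 0
-- ===== SOURCE B (Python) =====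
-- def checkComplex(x):
--     # periodic iff x occurs in (x+x) with both ends trimmed (classic doubling trick)
--     if x and x in (x + x)[1:-1]:
--         return int(x)
--     return 0
-- ===== Notes on version B (the rewrite author's own statement) =====
-- stated objective: faster
-- what changed: B replaces A's divisor enumeration with unit-by-unit comparison (O(n*d(n))) by the single doubling-trick substring test x in (x+x)[1:-1], one linear periodicity check.
import Mathlib
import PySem

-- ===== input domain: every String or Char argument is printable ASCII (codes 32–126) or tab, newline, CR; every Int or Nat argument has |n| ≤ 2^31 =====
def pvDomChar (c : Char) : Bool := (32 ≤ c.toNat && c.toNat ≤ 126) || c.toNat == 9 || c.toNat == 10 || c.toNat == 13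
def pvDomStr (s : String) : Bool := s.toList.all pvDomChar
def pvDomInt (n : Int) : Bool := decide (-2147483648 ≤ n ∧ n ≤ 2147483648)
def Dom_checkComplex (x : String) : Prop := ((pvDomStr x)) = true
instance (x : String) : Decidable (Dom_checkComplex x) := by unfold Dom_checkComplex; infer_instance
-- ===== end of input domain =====

-- B replaces A's divisor enumeration + unit-by-unit comparison by the single doubling-trick
-- substring test x in (x+x)[1:-1]; same return value everywhere A returns.

-- ===== PORT A =====
-- generateDivisors(n): for i in range(1, int(n**0.5)+1): if n % i == 0: yield i; if i != n//i: yield n//i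
-- int(n**0.5) is ported as Nat.sqrt n (identical for every string length arising here).
def pvDivisors (n : Nat) : List Nat :=
  (List.range' 1 (Nat.sqrt n)).flatMap (fun i =>
    if n % i = 0 then i :: (if i ≠ n / i then [n / i] else []) else [])

-- the inner 'for chk in units[1:]: if chk != units[0]: matches = False; break' loop
def pvAllEq (units : List (List Char)) (u0 : List Char) : Bool :=
  match units with
  | [] => true
  | chk :: rest => if chk ≠ u0 then false else pvAllEq rest u0

-- units = [x[i:i+d] for i in range(0, len(x), d)]
def pvUnits (l : List Char) (n d : Nat) : List (List Char) :=
  (PySem.List.pyRange 0 (n : Int) (d : Int)).map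
    (fun i => PySem.List.slice l (some i) (some (i + (d : Int))))

-- the 'for d in generateDivisors(len(x))' loop with its early return; int(x) is
-- (PySem.Int.ofStr? x).getD 0 — Python raises ValueError exactly where ofStr? is none (outside Pre_).
def pvLoopA (x : String) (l : List Char) (n : Nat) : List Nat → Int
  | [] => 0
  | d :: rest =>
    if d ≠ n then
      -- units is nonempty whenever this branch runs (1 ≤ d ≤ n), so units[0] = units.headD []
      if pvAllEq (PySem.List.slice (pvUnits l n d) (some 1) none) ((pvUnits l n d).headD []) then
        (PySem.Int.ofStr? x).getD 0
      else pvLoopA x l n rest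
    else pvLoopA x l n rest

def checkComplex (x : String) : Int :=
  pvLoopA x x.toList x.toList.length (pvDivisors x.toList.length)

-- ===== PORT B =====
def checkComplex_alt (x : String) : Int :=
  let t := x.toList
  if (!t.isEmpty) && PySem.Chars.isIn t (PySem.Chars.slice (t ++ t) (some 1) (some (-1))) then
    (PySem.Int.ofStr? x).getD 0
  else 0

-- ===== PRECONDITION & SPEC =====
-- Pre_ excludes exactly the inputs on which A raises ValueError: x periodic (a proper
-- divisor-length unit repeats to give x) while x is not a valid integer literal, so A's
-- final int conversion raises there.
def Pre_checkComplex (x : String) : Prop :=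
  (∃ d ∈ List.range x.toList.length, 0 < d ∧ x.toList.length % d = 0 ∧
      x.toList = (List.replicate (x.toList.length / d) (x.toList.take d)).flatten)
  → (PySem.Int.ofStr? x).isSome = true
instance (x : String) : Decidable (Pre_checkComplex x) := by unfold Pre_checkComplex; infer_instance
def pvWitness_checkComplex : String := "2121"

def Spec_checkComplex (x : String) (out : Int) : Prop := out = checkComplex_alt x
instance (x : String) (out : Int) : Decidable (Spec_checkComplex x out) := by unfold Spec_checkComplex; infer_instance

-- ===== CLAIM (what is proved, stated in full; the proofs are below) =====
def Claim_equal_checkComplex : Prop := ∀ (x : String), Dom_checkComplex x → Pre_checkComplex x → Spec_checkComplex x (checkComplex x)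

-- ===== LEMMAS AND PROOFS =====

-- x is 'periodic': some proper divisor-length prefix repeats to give the whole list
def pvPeriodic (l : List Char) : Prop :=
  ∃ d, 0 < d ∧ d < l.length ∧ l.length % d = 0 ∧
    l = (List.replicate (l.length / d) (l.take d)).flatten

theorem pv_flat_len (u : List Char) : ∀ (m : Nat), ((List.replicate m u).flatten).length = m * u.length := by
  intro m
  induction m with
  | zero => simp
  | succ m ih => simp [List.replicate_succ, ih, Nat.succ_mul]; ring

theorem pv_flat_drop (u : List Char) (d : Nat) (hu : u.length = d) :
    ∀ (j m : Nat), j ≤ m →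
      ((List.replicate m u).flatten).drop (d*j) = (List.replicate (m-j) u).flatten := by
  intro j
  induction j with
  | zero => intro m _; simp
  | succ j ih =>
    intro m hm
    rcases m with _ | m'
    · omega
    · have h1 : d * (j+1) = d + d*j := by ring
      rw [h1, ← List.drop_drop]
      rw [List.replicate_succ, List.flatten_cons, ← hu, List.drop_left]
      rw [hu, ih m' (by omega)]
      have e : m' + 1 - (j + 1) = m' - j := by omega
      rw [e]

-- commuting words are powers of a common word
theorem pv_comm_pow : ∀ (N : Nat) (u v : List Char), u.length + v.length ≤ N → u ++ v = v ++ u →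
    ∃ (w : List Char) (a b : Nat),
      u = (List.replicate a w).flatten ∧ v = (List.replicate b w).flatten := by
  intro N
  induction N with
  | zero =>
    intro u v hlen _
    have hu : u = [] := List.eq_nil_of_length_eq_zero (by omega)
    have hv : v = [] := List.eq_nil_of_length_eq_zero (by omega)
    exact ⟨[], 0, 0, by simp [hu], by simp [hv]⟩
  | succ N ih =>
    intro u v hlen h
    by_cases hu : u = []
    · exact ⟨v, 0, 1, by simp [hu], by simp⟩
    by_cases hv : v = []
    · exact ⟨u, 1, 0, by simp, by simp [hv]⟩
    have hu1 : 1 ≤ u.length := by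
      rcases u with _ | _ <;> simp_all
    have hv1 : 1 ≤ v.length := by
      rcases v with _ | _ <;> simp_all
    by_cases hle : u.length ≤ v.length
    · -- u is a prefix of v
      have hpref : u <+: v := by
        rw [List.prefix_iff_eq_take]
        calc u = List.take u.length (u ++ v) := (List.take_left).symm
        _ = List.take u.length (v ++ u) := by rw [h]
        _ = List.take u.length v := List.take_append_of_le_length hle
      obtain ⟨v₂, rfl⟩ := hpref
      have h2 : u ++ v₂ = v₂ ++ u := by
        have h' : u ++ (u ++ v₂) = (u ++ v₂) ++ u := h
        rw [List.append_assoc] at h'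
        exact List.append_cancel_left h'
      obtain ⟨w, a, b, hw1, hw2⟩ := ih u v₂ (by simp at hlen ⊢; omega) h2
      refine ⟨w, a, a + b, hw1, ?_⟩
      rw [hw1, hw2, List.replicate_add, List.flatten_append]
    · -- v is a proper prefix of u
      have hpref : v <+: u := by
        rw [List.prefix_iff_eq_take]
        calc v = List.take v.length (v ++ u) := (List.take_left).symm
        _ = List.take v.length (u ++ v) := by rw [h]
        _ = List.take v.length u := List.take_append_of_le_length (by omega)
      obtain ⟨u₂, rfl⟩ := hpref
      have h2 : u₂ ++ v = v ++ u₂ := by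
        have h' : (v ++ u₂) ++ v = v ++ (v ++ u₂) := h
        rw [List.append_assoc] at h'
        exact List.append_cancel_left h'
      obtain ⟨w, a, b, hw1, hw2⟩ := ih u₂ v (by simp at hlen ⊢; omega) h2
      refine ⟨w, b + a, b, ?_, hw2⟩
      rw [hw1, hw2, List.replicate_add, List.flatten_append]

-- divisor list characterization
theorem pv_mem_divisors (n d : Nat) : d ∈ pvDivisors n ↔ 0 < d ∧ 0 < n ∧ d ∣ n := by
  unfold pvDivisors
  simp only [List.mem_flatMap, List.mem_range'_1]
  constructor
  · rintro ⟨i, ⟨h1i, hlti⟩, hmem⟩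
    have hin : i ≤ Nat.sqrt n := by omega
    have hiin : i * i ≤ n := Nat.le_sqrt.mp hin
    have hnpos : 0 < n := by
      have : 1 * 1 ≤ i * i := Nat.mul_le_mul h1i h1i
      omega
    by_cases hmod : n % i = 0
    · rw [if_pos hmod] at hmem
      have hdvd : i ∣ n := Nat.dvd_of_mod_eq_zero hmod
      rcases List.mem_cons.mp hmem with rfl | hmem'
      · exact ⟨h1i, hnpos, hdvd⟩
      · by_cases hne : i ≠ n / i
        · rw [if_pos hne] at hmem'
          simp at hmem'
          subst hmem'
          obtain ⟨c, hc⟩ := hdvd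
          refine ⟨?_, hnpos, ?_⟩
          · exact Nat.div_pos (Nat.le_of_dvd hnpos ⟨c, hc⟩) h1i
          · rw [hc, Nat.mul_div_cancel_left _ h1i]
            exact ⟨i, by ring⟩
        · rw [if_neg hne] at hmem'; simp at hmem'
    · rw [if_neg hmod] at hmem; simp at hmem
  · rintro ⟨hd, hn, hdvd⟩
    have hdn : d ≤ n := Nat.le_of_dvd hn hdvd
    by_cases hle : d ≤ Nat.sqrt n
    · refine ⟨d, ⟨hd, by omega⟩, ?_⟩
      rw [if_pos (Nat.mod_eq_zero_of_dvd hdvd)]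
      exact List.mem_cons_self
    · push_neg at hle
      obtain ⟨c, hc⟩ := hdvd
      have hc_eq : n / d = c := by rw [hc, Nat.mul_div_cancel_left _ hd]
      have hlt : n < d * d := Nat.sqrt_lt.mp hle
      have hcd : c < d := by
        by_contra hcd
        push_neg at hcd
        have : d * d ≤ d * c := Nat.mul_le_mul_left d hcd
        omega
      have hcpos : 0 < c := by
        rcases Nat.eq_zero_or_pos c with rfl | h
        · omega
        · exact h
      have hcin : c ≤ Nat.sqrt n := by
        rw [Nat.le_sqrt]
        calc c * c ≤ c * d := Nat.mul_le_mul_left c (le_of_lt hcd)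
        _ = d * c := by ring
        _ = n := hc.symm
      refine ⟨c, ⟨hcpos, by omega⟩, ?_⟩
      have hmodc : n % c = 0 := Nat.mod_eq_zero_of_dvd ⟨d, by rw [hc]; ring⟩
      rw [if_pos hmodc]
      have hdivc : n / c = d := by rw [hc, Nat.mul_comm, Nat.mul_div_cancel_left _ hcpos]
      have hne : c ≠ n / c := by rw [hdivc]; omega
      rw [if_pos hne, hdivc]
      exact List.mem_cons_of_mem _ List.mem_cons_self

-- chunk form of units for a positive divisor of the length
theorem pv_units_eq (l : List Char) (d : Nat) (hd : 0 < d) (hdvd : d ∣ l.length) :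
    pvUnits l l.length d
      = (List.range (l.length / d)).map (fun j => (l.drop (d*j)).take d) := by
  unfold pvUnits
  obtain ⟨m, hm⟩ := hdvd
  rw [PySem.List.pyRange_of_pos 0 (l.length : Int) (s := (d : Int)) (by exact_mod_cast hd)]
  have hcount : (if (0:Int) < (l.length:Int) then ((((l.length:Int)) - 0 + (d:Int) - 1) / (d:Int)).toNat else 0) = l.length / d := by
    rcases Nat.eq_zero_or_pos l.length with h0 | hpos
    · rw [h0]; simp
    · rw [if_pos (by exact_mod_cast hpos)]
      have hdiv : (((l.length:Int)) - 0 + (d:Int) - 1) / (d:Int) = (m : Int) := by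
        have e1 : ((l.length:Int)) - 0 + (d:Int) - 1 = ((d:Int) - 1) + (d:Int) * (m:Int) := by
          rw [hm]; push_cast; ring
        rw [e1, Int.add_mul_ediv_left _ _ (by exact_mod_cast hd.ne')]
        rw [Int.ediv_eq_zero_of_lt (by omega) (by omega)]
        ring
      rw [hdiv, hm, Nat.mul_div_cancel_left _ hd]
      simp
  rw [hcount, List.map_map]
  apply List.map_congr_left
  intro k hk
  simp only [Function.comp_apply]
  have h1 : (0 + (d:Int) * (k:Int)) = ((d*k : Nat) : Int) := by push_cast; ring
  rw [h1]
  have h2 : ((d*k : Nat) : Int) + (d:Int) = ((d*k : Nat) : Int) + ((d:Nat) : Int) := by norm_cast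
  rw [h2, PySem.List.slice_natCast_add]

-- the inner comparison loop checks equality of every element with the first one
theorem pv_allEq_iff (us : List (List Char)) (u0 : List Char) :
    pvAllEq us u0 = true ↔ ∀ u ∈ us, u = u0 := by
  induction us with
  | nil => simp [pvAllEq]
  | cons c r ih => by_cases h : c = u0 <;> simp [pvAllEq, h, ih]

-- chunk equality ↔ replicate-flatten form
theorem pv_chunks_iff (d : Nat) (_hd : 0 < d) :
    ∀ (m : Nat) (l : List Char), l.length = m * d →
      ((∀ j < m, (l.drop (d*j)).take d = l.take d) ↔ l = (List.replicate m (l.take d)).flatten) := by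
  intro m
  induction m with
  | zero =>
    intro l hlen
    have hl : l = [] := List.eq_nil_of_length_eq_zero (by omega)
    subst hl; simp
  | succ m ih =>
    intro l hlen
    have hdle : d ≤ l.length := by
      have : 1 * d ≤ (m+1) * d := Nat.mul_le_mul_right d (by omega)
      omega
    have hu_len : (l.take d).length = d := by rw [List.length_take]; omega
    have hr_len : (l.drop d).length = m * d := by rw [List.length_drop, hlen, Nat.succ_mul]; omega
    have hl_eq : l = l.take d ++ l.drop d := (List.take_append_drop d l).symm
    have chunk_succ : ∀ j, (l.drop (d*(j+1))).take d = ((l.drop d).drop (d*j)).take d := by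
      intro j
      rw [List.drop_drop]
      congr 2
      ring
    constructor
    · intro h
      rcases Nat.eq_zero_or_pos m with rfl | hm
      · have hdl : l.length ≤ d := by omega
        have : l.take d = l := List.take_of_length_le hdl
        simp [this]
      · have hu_r : (l.drop d).take d = l.take d := by
          have h1 := h 1 (by omega)
          have : (l.drop (d*1)).take d = ((l.drop d).drop (d*0)).take d := chunk_succ 0
          simp only [Nat.mul_zero, List.drop_zero] at this
          rw [← this]
          simpa using h1
        have hchunks_r : ∀ j < m, ((l.drop d).drop (d*j)).take d = (l.drop d).take d := by
          intro j hj
          rw [hu_r, ← chunk_succ j]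
          exact h (j+1) (by omega)
        have hrec := (ih (l.drop d) hr_len).mp hchunks_r
        rw [hu_r] at hrec
        calc l = l.take d ++ l.drop d := hl_eq
        _ = l.take d ++ (List.replicate m (l.take d)).flatten := by rw [← hrec]
        _ = (List.replicate (m+1) (l.take d)).flatten := by
              rw [List.replicate_succ, List.flatten_cons]
    · intro h j hj
      have hdrop : l.drop (d*j) = (List.replicate (m+1-j) (l.take d)).flatten := by
        conv_lhs => rw [h]
        exact pv_flat_drop _ d hu_len j (m+1) (by omega)
      rw [hdrop]
      have h1 : m+1-j = (m-j) + 1 := by omega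
      rw [h1, List.replicate_succ, List.flatten_cons]
      rw [List.take_append_of_le_length (le_of_eq hu_len.symm), List.take_take]
      simp

-- A's loop returns int(x) iff some listed divisor ≠ n matches, else 0
theorem pv_loopA_eq (x : String) (l : List Char) (n : Nat) (ds : List Nat) :
    pvLoopA x l n ds =
      if ∃ d ∈ ds, d ≠ n ∧ pvAllEq (PySem.List.slice (pvUnits l n d) (some 1) none)
          ((pvUnits l n d).headD []) = true
      then (PySem.Int.ofStr? x).getD 0 else 0 := by
  induction ds with
  | nil => simp [pvLoopA]
  | cons d rest ih =>
    by_cases hdn : d = n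
    · subst hdn
      have step : pvLoopA x l d (d :: rest) = pvLoopA x l d rest := by
        simp only [pvLoopA]
        rw [if_neg (by simp)]
      rw [step, ih]
      apply if_congr _ rfl rfl
      constructor
      · rintro ⟨d', hm, hp⟩
        exact ⟨d', List.mem_cons_of_mem _ hm, hp⟩
      · rintro ⟨d', hm, hne, hp⟩
        rcases List.mem_cons.mp hm with rfl | hm'
        · exact absurd rfl hne
        · exact ⟨d', hm', hne, hp⟩
    · have step : pvLoopA x l n (d :: rest) =
          if pvAllEq (PySem.List.slice (pvUnits l n d) (some 1) none)
              ((pvUnits l n d).headD []) = true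
          then (PySem.Int.ofStr? x).getD 0 else pvLoopA x l n rest := by
        simp only [pvLoopA]
        rw [if_pos hdn]
      rw [step]
      by_cases hm : pvAllEq (PySem.List.slice (pvUnits l n d) (some 1) none)
          ((pvUnits l n d).headD []) = true
      · rw [if_pos hm, if_pos ⟨d, List.mem_cons_self, hdn, hm⟩]
      · rw [if_neg hm, ih]
        apply if_congr _ rfl rfl
        constructor
        · rintro ⟨d', hm', hp⟩
          exact ⟨d', List.mem_cons_of_mem _ hm', hp⟩
        · rintro ⟨d', hm', hne, hp⟩
          rcases List.mem_cons.mp hm' with rfl | hm''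
          · exact absurd hp hm
          · exact ⟨d', hm'', hne, hp⟩

-- for a proper positive divisor d, the match test is the replicate-flatten condition
theorem pv_match_iff (l : List Char) (d : Nat) (hd : 0 < d) (hdvd : d ∣ l.length)
    (hdn : d < l.length) :
    pvAllEq (PySem.List.slice (pvUnits l l.length d) (some 1) none)
        ((pvUnits l l.length d).headD []) = true
      ↔ l = (List.replicate (l.length / d) (l.take d)).flatten := by
  rw [PySem.List.slice_from_one, pv_units_eq l d hd hdvd]
  have hm1 : 1 ≤ l.length / d := Nat.one_le_div_iff hd |>.mpr (le_of_lt hdn)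
  obtain ⟨m', hm'⟩ : ∃ m', l.length / d = m' + 1 := ⟨l.length / d - 1, by omega⟩
  have hlen : l.length = (m' + 1) * d := by
    rw [← hm']
    exact (Nat.div_mul_cancel hdvd).symm
  rw [hm', List.range_succ_eq_map]
  simp only [List.map_cons, List.tail_cons, List.headD_cons, List.map_map, Nat.mul_zero,
    List.drop_zero]
  rw [pv_allEq_iff]
  rw [← hm', ← pv_chunks_iff d hd (l.length / d) l (Nat.div_mul_cancel hdvd).symm, hm']
  constructor
  · intro h j hj
    rcases j with _ | j'
    · simp
    · have := h _ (List.mem_map.mpr ⟨j', List.mem_range.mpr (by omega), rfl⟩)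
      simpa [Function.comp] using this
  · intro h u hu
    obtain ⟨j, hj, rfl⟩ := List.mem_map.mp hu
    have := h (j+1) (by simp at hj; omega)
    simpa [Function.comp] using this

-- A's guard over the whole divisor list is pvPeriodic
theorem pv_cond_iff (l : List Char) :
    (∃ d ∈ pvDivisors l.length, d ≠ l.length ∧
        pvAllEq (PySem.List.slice (pvUnits l l.length d) (some 1) none)
          ((pvUnits l l.length d).headD []) = true)
      ↔ pvPeriodic l := by
  constructor
  · rintro ⟨d, hmem, hne, hmatch⟩
    obtain ⟨hd, hn, hdvd⟩ := (pv_mem_divisors _ _).mp hmem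
    have hlt : d < l.length := lt_of_le_of_ne (Nat.le_of_dvd hn hdvd) hne
    exact ⟨d, hd, hlt, Nat.mod_eq_zero_of_dvd hdvd, (pv_match_iff l d hd hdvd hlt).mp hmatch⟩
  · rintro ⟨d, hd, hlt, hmod, heq⟩
    have hdvd : d ∣ l.length := Nat.dvd_of_mod_eq_zero hmod
    refine ⟨d, (pv_mem_divisors _ _).mpr ⟨hd, by omega, hdvd⟩, by omega, ?_⟩
    exact (pv_match_iff l d hd hdvd hlt).mpr heq

theorem pv_A_pos (x : String) (h : pvPeriodic x.toList) :
    checkComplex x = (PySem.Int.ofStr? x).getD 0 := by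
  unfold checkComplex
  rw [pv_loopA_eq, if_pos ((pv_cond_iff x.toList).mpr h)]

theorem pv_A_neg (x : String) (h : ¬ pvPeriodic x.toList) :
    checkComplex x = 0 := by
  unfold checkComplex
  rw [pv_loopA_eq, if_neg (fun hc => h ((pv_cond_iff x.toList).mp hc))]

-- (l++l)[1:-1] computed
theorem pv_slice_mid (l : List Char) :
    PySem.Chars.slice (l ++ l) (some 1) (some (-1)) = (l ++ l).tail.dropLast := by
  rcases l with _ | ⟨c, l'⟩
  · simp [PySem.Chars.slice, PySem.List.slice, PySem.List.clampIdx]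
  · simp only [PySem.Chars.slice_eq_listSlice]
    unfold PySem.List.slice
    simp only [PySem.List.clampIdx_neg_one]
    have h1 : PySem.List.clampIdx ((c :: l') ++ c :: l').length 1 = 1 := by
      simp [PySem.List.clampIdx]
    rw [h1, ← List.drop_one, List.dropLast_eq_take, List.length_drop]

-- periodicity ↔ occurrence in the doubled trimmed word
theorem pv_flat_take (u : List Char) (m : Nat) (hm : 0 < m) :
    ((List.replicate m u).flatten).take u.length = u := by
  rcases m with _ | m'
  · omega
  · rw [List.replicate_succ, List.flatten_cons, List.take_left]

-- periodicity ↔ occurrence in the doubled trimmed word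
theorem pv_doubling (l : List Char) (hl : l ≠ []) :
    pvPeriodic l ↔ l <:+: (l ++ l).tail.dropLast := by
  constructor
  · rintro ⟨d, hd, hlt, hmod, heq⟩
    have hdvd : d ∣ l.length := Nat.dvd_of_mod_eq_zero hmod
    obtain ⟨u, hu_def⟩ : ∃ u, l.take d = u := ⟨_, rfl⟩
    rw [hu_def] at heq
    have hu_len : u.length = d := by rw [← hu_def, List.length_take]; omega
    have hu_ne : u ≠ [] := by
      intro h0
      rw [h0] at hu_len
      simp at hu_len
      omega
    have hn_eq : l.length = (l.length / d) * d := (Nat.div_mul_cancel hdvd).symm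
    have hm2 : 2 ≤ l.length / d := by
      have h1 : 2 * d ≤ l.length := by
        rcases hdvd with ⟨c, hc⟩
        rcases Nat.lt_or_ge c 2 with h | h
        · interval_cases c <;> omega
        · calc 2 * d = d * 2 := by ring
          _ ≤ d * c := Nat.mul_le_mul_left d h
          _ = l.length := hc.symm
      exact (Nat.le_div_iff_mul_le hd).mpr (by omega)
    obtain ⟨k, hk⟩ : ∃ k, l.length / d = k + 2 := ⟨l.length / d - 2, by omega⟩
    rw [hk] at heq
    have hflat : ∀ a b : Nat,
        (List.replicate a u).flatten ++ (List.replicate b u).flatten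
          = (List.replicate (a+b) u).flatten := by
      intro a b
      rw [List.replicate_add, List.flatten_append]
    have hll : l ++ l = u ++ ((List.replicate (2*k+2) u).flatten ++ u) := by
      conv_lhs => rw [heq]
      rw [hflat]
      have e1 : k + 2 + (k + 2) = 1 + ((2*k+2) + 1) := by omega
      rw [e1, ← hflat, ← hflat]
      simp [List.replicate_succ]
    have hstep : (l ++ l).tail.dropLast
        = u.tail ++ ((List.replicate (2*k+2) u).flatten ++ u.dropLast) := by
      rw [hll, List.tail_append, if_neg (by simp [hu_ne])]
      rw [show u.tail ++ ((List.replicate (2*k+2) u).flatten ++ u)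
            = (u.tail ++ (List.replicate (2*k+2) u).flatten) ++ u from by
          simp [List.append_assoc]]
      rw [List.dropLast_append, if_neg (by simp [hu_ne])]
      simp [List.append_assoc]
    refine ⟨u.tail, (List.replicate k u).flatten ++ u.dropLast, ?_⟩
    rw [hstep]
    conv_lhs => rw [heq]
    simp only [List.append_assoc]
    congr 1
    rw [← List.append_assoc, hflat]
    have e2 : k + 2 + k = 2*k + 2 := by omega
    rw [e2]
  · rintro ⟨s, t, hst⟩
    have hn1 : 1 ≤ l.length := List.length_pos_iff.mpr hl
    have hlens : s.length + l.length + t.length = 2 * l.length - 2 := by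
      have := congrArg List.length hst
      simp [List.length_tail, List.length_dropLast] at this
      omega
    have hn2 : 2 ≤ l.length := by omega
    have hkn : s.length + 1 ≤ l.length - 1 := by omega
    have h1 : (l ++ l).tail.dropLast = ((l ++ l).drop 1).take (2 * l.length - 2) := by
      rw [← List.drop_one, List.dropLast_eq_take, List.length_drop]
      congr 1
      simp
      omega
    have hst' : s ++ (l ++ t) = ((l ++ l).drop 1).take (2 * l.length - 2) := by
      rw [← List.append_assoc, hst, h1]
    have h2 := congrArg (List.drop s.length) hst'
    rw [List.drop_left] at h2
    rw [List.drop_take, List.drop_drop] at h2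
    have e1 : 2 * l.length - 2 - s.length = 2 * l.length - 1 - (s.length + 1) := by omega
    have e2 : 1 + s.length = s.length + 1 := by omega
    rw [e1, e2] at h2
    have hpref : l <+: (l ++ l).drop (s.length + 1) :=
      List.IsPrefix.trans ⟨t, h2⟩ (List.take_prefix _ _)
    have hl_eq : l = ((l ++ l).drop (s.length + 1)).take l.length :=
      List.prefix_iff_eq_take.mp hpref
    have hdk : (l ++ l).drop (s.length + 1) = l.drop (s.length + 1) ++ l :=
      List.drop_append_of_le_length (by omega)
    have hrot : l.drop (s.length + 1) ++ l.take (s.length + 1) = l := by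
      rw [hdk] at hl_eq
      rw [List.take_append] at hl_eq
      rw [List.take_of_length_le (by simp)] at hl_eq
      have e : l.length - (l.drop (s.length + 1)).length = s.length + 1 := by
        simp
        omega
      rw [e] at hl_eq
      exact hl_eq.symm
    have hcomm : l.take (s.length + 1) ++ l.drop (s.length + 1)
        = l.drop (s.length + 1) ++ l.take (s.length + 1) := by
      rw [List.take_append_drop]
      exact hrot.symm
    obtain ⟨w, a, b, hwa, hwb⟩ :=
      pv_comm_pow (l.length) (l.take (s.length + 1)) (l.drop (s.length + 1)) (by simp; omega) hcomm
    have hw_ne : w ≠ [] := by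
      intro h0
      rw [h0] at hwa
      simp [List.take_eq_nil_iff] at hwa
      exact absurd hwa hl
    have hd1 : 1 ≤ w.length := List.length_pos_iff.mpr hw_ne
    have ha1 : 1 ≤ a := by
      by_contra h0
      push_neg at h0
      interval_cases a
      simp [List.take_eq_nil_iff] at hwa
      exact absurd hwa hl
    have hb1 : 1 ≤ b := by
      by_contra h0
      push_neg at h0
      interval_cases b
      simp [List.drop_eq_nil_iff] at hwb
      omega
    have hl_flat : l = (List.replicate (a+b) w).flatten := by
      rw [← List.take_append_drop (s.length + 1) l]
      rw [hwa, hwb, ← List.flatten_append, ← List.replicate_add]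
    have hn_flat : l.length = (a+b) * w.length := by rw [hl_flat, pv_flat_len]
    unfold pvPeriodic
    refine ⟨w.length, hd1, ?_, ?_, ?_⟩
    · have : 2 * w.length ≤ (a+b) * w.length := Nat.mul_le_mul_right _ (by omega)
      omega
    · rw [hn_flat]
      exact Nat.mul_mod_left _ _
    · have hdiv : l.length / w.length = a + b := by
        rw [hn_flat, Nat.mul_div_cancel _ (by omega)]
      have htake : l.take w.length = w := by
        conv_lhs => rw [hl_flat]
        exact pv_flat_take w (a+b) (by omega)
      rw [hdiv, htake]
      exact hl_flat

-- ===== VERDICT (by name: the statement is the Claim_ definition above) =====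
theorem checkComplex_spec : Claim_equal_checkComplex := by
  intro x _ _
  unfold Spec_checkComplex checkComplex_alt
  by_cases h : pvPeriodic x.toList
  · have hne : x.toList ≠ [] := by
      rcases h with ⟨d, hd, hlt, _⟩
      intro h0
      rw [h0] at hlt
      simp at hlt
    rw [pv_A_pos x h]
    have hinfix := (pv_doubling _ hne).mp h
    simp only [pv_slice_mid]
    rw [if_pos]
    simp only [Bool.and_eq_true, Bool.not_eq_true']
    exact ⟨by simpa using hne, (PySem.Chars.isIn_iff_infix _ _).mpr hinfix⟩
  · rw [pv_A_neg x h]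
    by_cases hne : x.toList = []
    · simp [hne]
    · have hni : ¬ (x.toList <:+: (x.toList ++ x.toList).tail.dropLast) :=
        fun hc => h ((pv_doubling _ hne).mpr hc)
      simp only [pv_slice_mid]
      rw [if_neg]
      simp only [Bool.and_eq_true, Bool.not_eq_true']
      rintro ⟨-, hin⟩
      exact hni ((PySem.Chars.isIn_iff_infix _ _).mp hin)
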